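-- pv_equiv track=rewrite | github.com/Vijay11-08/All-In-One-Directory | One Pattern/Star Number Patterns/print_patterns.py | hollow_triangle
-- ===== SOURCE A (Python) =====
-- def hollow_triangle(n: int) -> str:
--     """Centered hollow pyramid; bottom row is filled with stars (n stars)."""
--     w = 2 * n - 1
--     lines: list[str] = []
--     for i in range(1, n + 1):
--         if i == 1:
--             lines.append("*".center(w))
--         elif i == n:
--             lines.append(" ".join("*" * n))
--         else:
--             inner = 2 * i - 3
--             lines.append(("*" + " " * inner + "*").center(w))
--     return "\n".join(lines)
-- ===== SOURCE B (Python) =====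
-- def hollow_triangle(n: int) -> str:
--     """Render with one reusable character buffer: stamp the two diagonal cells,
--     snapshot the row, erase them again; the bottom row stamps every even column."""
--     if n <= 0:
--         return ""
--     w = 2 * n - 1
--     buf = [" "] * w
--     out = []
--     for r in range(n - 1):
--         buf[n - 1 - r] = "*"
--         buf[n - 1 + r] = "*"
--         out.append("".join(buf))
--         buf[n - 1 - r] = " "
--         buf[n - 1 + r] = " "
--     for c in range(0, w, 2):
--         buf[c] = "*"
--     out.append("".join(buf))
--     return "\n".join(out)
-- ===== Notes on version B (the rewrite author's own statement) =====
-- stated objective: alternative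
-- what changed: B draws into one reusable mutable character buffer by index (stamp the two diagonal cells, snapshot the row, erase them; stamp even columns for the bottom row) instead of A's per-row string building with center() and join().
import Mathlib
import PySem

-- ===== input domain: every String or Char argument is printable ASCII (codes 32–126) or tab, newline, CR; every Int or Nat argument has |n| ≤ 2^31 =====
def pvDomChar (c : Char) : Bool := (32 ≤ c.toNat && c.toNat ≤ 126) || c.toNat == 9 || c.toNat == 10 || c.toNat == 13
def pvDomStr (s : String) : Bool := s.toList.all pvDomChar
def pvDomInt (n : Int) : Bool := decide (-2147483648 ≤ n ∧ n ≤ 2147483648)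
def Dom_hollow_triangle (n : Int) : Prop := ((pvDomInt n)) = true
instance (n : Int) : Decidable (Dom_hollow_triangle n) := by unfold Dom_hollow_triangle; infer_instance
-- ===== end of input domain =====

-- B renders each row by stamping and erasing the two diagonal cells in one reusable
-- character buffer (the bottom row stamps every even column) instead of A's per-row
-- center()/join() string building; alternative structure, same cost.

-- ===== PORT A =====
-- str.center(w): CPython computes marg = w - len(s), left = marg // 2 + (marg & w & 1).
-- 'x & y & 1 = 1' holds exactly when both x and y are odd (true for all Python ints in
-- two's complement), so the bit test is ported as the parity test below (exact).
def pyCenter (s : List Char) (w : Int) : List Char :=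
  if w ≤ (s.length : Int) then s
  else
    let marg := w - (s.length : Int)
    let left := PySem.Int.floordiv marg 2 +
      (if PySem.Int.mod marg 2 = 1 ∧ PySem.Int.mod w 2 = 1 then 1 else 0)
    List.replicate left.toNat ' ' ++ s ++ List.replicate (marg - left).toNat ' '

def hollow_triangle (n : Int) : String :=
  let w := 2 * n - 1
  let lines : List (List Char) :=
    (PySem.List.pyRange 1 (n + 1) 1).foldl
      (fun lines i =>
        if i = 1 then
          lines ++ [pyCenter ['*'] w]
        else if i = n then
          lines ++ [PySem.Chars.join [' '] ((PySem.List.pyRepeat ['*'] n).map (fun c => [c]))]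
        else
          let inner := 2 * i - 3
          lines ++ [pyCenter (['*'] ++ PySem.List.pyRepeat [' '] inner ++ ['*']) w])
      []
  String.ofList (PySem.Chars.join ['\n'] lines)

-- ===== PORT B =====
def hollow_triangle_alt (n : Int) : String :=
  if n ≤ 0 then "" else
  let w := (2 * n - 1).toNat
  let st := (PySem.List.pyRange 0 (n - 1) 1).foldl
      (fun (st : List Char × List (List Char)) r =>
        let buf := (st.1.set (n - 1 - r).toNat '*').set (n - 1 + r).toNat '*'
        let out := st.2 ++ [buf]
        (((buf.set (n - 1 - r).toNat ' ').set (n - 1 + r).toNat ' '), out))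
      (List.replicate w ' ', ([] : List (List Char)))
  let buf := (PySem.List.pyRange 0 (2 * n - 1) 2).foldl (fun b c => b.set c.toNat '*') st.1
  String.ofList (PySem.Chars.join ['\n'] (st.2 ++ [buf]))

-- ===== PRECONDITION & SPEC =====
def Spec_hollow_triangle (n : Int) (out : String) : Prop := out = hollow_triangle_alt n
instance (n : Int) (out : String) : Decidable (Spec_hollow_triangle n out) := by unfold Spec_hollow_triangle; infer_instance

-- ===== CLAIM (what is proved, stated in full; the proofs are below) =====
def Claim_equal_hollow_triangle : Prop := ∀ (n : Int), Dom_hollow_triangle n → Spec_hollow_triangle n (hollow_triangle n)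

-- ===== LEMMAS AND PROOFS =====

def starAt (N r c : Nat) : Char :=
  if c = N - 1 - r ∨ c = N - 1 + r ∨ (r = N - 1 ∧ c % 2 = 0) then '*' else ' '

def specRow (N r : Nat) : List Char := (List.range (2 * N - 1)).map (starAt N r)

-- one star at position a, total length a+1+b
theorem one_star (a b : Nat) :
    List.replicate a ' ' ++ '*' :: List.replicate b ' '
      = (List.range (a+1+b)).map (fun c => if c = a then '*' else ' ') := by
  apply List.ext_getElem (by simp; omega)
  intro c h1 h2
  simp only [List.getElem_map, List.getElem_range, List.getElem_append, List.length_replicate,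
    List.getElem_cons, List.getElem_replicate]
  split
  · rw [if_neg (by omega)]
  · split
    · rw [if_pos (by omega)]
    · rw [if_neg (by omega)]

-- two stars at positions p and p+q+1, total length p+q+r+2
theorem two_star (p q r : Nat) :
    List.replicate p ' ' ++ '*' :: (List.replicate q ' ' ++ '*' :: List.replicate r ' ')
      = (List.range (p+q+r+2)).map (fun c => if c = p ∨ c = p + q + 1 then '*' else ' ') := by
  apply List.ext_getElem (by simp; omega)
  intro c h1 h2
  simp only [List.getElem_map, List.getElem_range, List.getElem_append, List.length_replicate,
    List.getElem_cons, List.getElem_replicate]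
  split
  · rw [if_neg (by omega)]
  · split
    · rw [if_pos (by omega)]
    · split
      · rw [if_neg (by omega)]
      · split
        · rw [if_pos (by omega)]
        · rw [if_neg (by omega)]

-- bottom alternating row
theorem join_alt : ∀ (N : Nat), 1 ≤ N →
    PySem.Chars.join [' '] ((List.replicate N '*').map (fun c => [c]))
      = (List.range (2*N-1)).map (fun c => if c % 2 = 0 then '*' else ' ')
  | 1, _ => by simp [PySem.Chars.join_singleton]
  | (N+2), _ => by
    have ih := join_alt (N+1) (by omega)
    have h2 : 2*(N+2)-1 = 2 + (2*(N+1)-1) := by omega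
    rw [h2, List.range_add]
    simp only [List.replicate_succ, List.map_cons, PySem.Chars.join_cons_cons] at *
    rw [ih]
    simp only [List.map_append, List.map_map]
    have : (List.map (fun c => if c % 2 = 0 then '*' else ' ') (List.range 2)) = ['*', ' '] := by decide
    rw [this]
    have : (List.map ((fun c => if c % 2 = 0 then '*' else ' ') ∘ (fun x => 2 + x)) (List.range (2*(N+1)-1)))
         = (List.map (fun c => if c % 2 = 0 then '*' else ' ') (List.range (2*(N+1)-1))) := by
      apply List.map_congr_left
      intro x _
      simp [Function.comp, Nat.add_mod_left]
    rw [this]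
    rfl

theorem rowA_top (n : Int) (hn : 2 ≤ n) : pyCenter ['*'] (2*n-1) = specRow n.toNat 0 := by
  rw [pyCenter]
  simp only [List.length_cons, List.length_nil, Nat.cast_one, Nat.cast_zero, zero_add, Nat.cast_ofNat]
  rw [if_neg (by omega)]
  have hd : PySem.Int.floordiv (2*n-1-1) 2 = n - 1 := by
    rw [PySem.Int.floordiv_eq_ediv_of_pos (by omega)]; omega
  have hm : PySem.Int.mod (2*n-1-1) 2 = 0 := by
    rw [PySem.Int.mod_eq_emod_of_pos (by omega)]; omega
  simp only [hd, hm]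
  rw [if_neg (by omega)]
  have := one_star (n-1).toNat (n-1).toNat
  simp only [List.append_assoc, List.singleton_append] at this ⊢
  have h0 : (n - 1 + (0:Int)) = n - 1 := by omega
  rw [h0]
  have h2 : (2*n-1-1-(n-1)) = n-1 := by omega
  rw [h2, this, specRow]
  have hlen : (n-1).toNat + 1 + (n-1).toNat = 2 * n.toNat - 1 := by omega
  rw [hlen]
  apply List.map_congr_left
  intro c hc
  simp only [List.mem_range] at hc
  unfold starAt
  split
  · rw [if_pos (by omega)]
  · rw [if_neg (by omega)]

theorem rowA_top1 : pyCenter ['*'] (2*1-1) = specRow 1 0 := by decide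

theorem rowA_mid (n i : Int) (h2 : 2 ≤ i) (h3 : i ≤ n - 1) :
    pyCenter (['*'] ++ PySem.List.pyRepeat [' '] (2*i-3) ++ ['*']) (2*n-1)
      = specRow n.toNat (i-1).toNat := by
  rw [pyCenter, PySem.List.pyRepeat_singleton]
  have hlen1 : (['*'] ++ List.replicate (2*i-3).toNat ' ' ++ ['*']).length = (2*i-3).toNat + 2 := by
    simp only [List.length_append, List.length_cons, List.length_nil, List.length_replicate]; omega
  rw [hlen1]
  rw [if_neg (by push_cast; omega)]
  have hd : PySem.Int.floordiv (2*n-1 - ((2*i-3).toNat + 2 : Nat)) 2 = n - i := by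
    rw [PySem.Int.floordiv_eq_ediv_of_pos (by omega)]
    push_cast; omega
  have hm : PySem.Int.mod (2*n-1 - ((2*i-3).toNat + 2 : Nat)) 2 = 0 := by
    rw [PySem.Int.mod_eq_emod_of_pos (by omega)]
    push_cast; omega
  simp only [hd, hm]
  rw [if_neg (by omega)]
  have h0 : (n - i + (0:Int)) = n - i := by omega
  rw [h0]
  have h4 : (2*n-1 - ((2*i-3).toNat + 2 : Nat) - (n-i)) = n - i := by push_cast; omega
  rw [h4]
  have := two_star (n-i).toNat (2*i-3).toNat (n-i).toNat
  simp only [List.append_assoc, List.singleton_append, List.cons_append, List.nil_append] at this ⊢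
  rw [this, specRow]
  have hlen : (n-i).toNat + (2*i-3).toNat + (n-i).toNat + 2 = 2 * n.toNat - 1 := by omega
  rw [hlen]
  apply List.map_congr_left
  intro c hc
  simp only [List.mem_range] at hc
  unfold starAt
  split
  · rw [if_pos (by omega)]
  · rw [if_neg (by omega)]

theorem rowA_bot (n : Int) (hn : 2 ≤ n) :
    PySem.Chars.join [' '] ((PySem.List.pyRepeat ['*'] n).map (fun c => [c]))
      = specRow n.toNat (n-1).toNat := by
  rw [PySem.List.pyRepeat_singleton, join_alt n.toNat (by omega), specRow]
  apply List.map_congr_left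
  intro c hc
  simp only [List.mem_range] at hc
  unfold starAt
  split
  · rw [if_pos (by omega)]
  · rw [if_neg (by omega)]

theorem flatten_singletons {α : Type} (f : α → List Char) (l : List α) :
    (List.map (fun a => [f a]) l).flatten = List.map f l := by
  induction l with
  | nil => rfl
  | cons x xs ih => simp [ih]

theorem a_rows (n : Int) (hn : 1 ≤ n) :
    hollow_triangle n =
      String.ofList (PySem.Chars.join ['\n'] ((List.range n.toNat).map (specRow n.toNat))) := by
  rw [hollow_triangle]
  have hfun : (fun (lines : List (List Char)) (i : Int) =>
        if i = 1 then lines ++ [pyCenter ['*'] (2*n-1)]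
        else if i = n then
          lines ++ [PySem.Chars.join [' '] ((PySem.List.pyRepeat ['*'] n).map (fun c => [c]))]
        else
          lines ++ [pyCenter (['*'] ++ PySem.List.pyRepeat [' '] (2*i-3) ++ ['*']) (2*n-1)])
      = (fun (lines : List (List Char)) (i : Int) => lines ++
          (if i = 1 then [pyCenter ['*'] (2*n-1)]
           else if i = n then
             [PySem.Chars.join [' '] ((PySem.List.pyRepeat ['*'] n).map (fun c => [c]))]
           else
             [pyCenter (['*'] ++ PySem.List.pyRepeat [' '] (2*i-3) ++ ['*']) (2*n-1)])) := by
    funext lines i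
    split
    · rfl
    · split <;> rfl
  simp only []
  rw [hfun, PySem.List.foldl_append_eq_flatMap]
  rw [List.nil_append]
  rw [PySem.List.pyRange_one]
  have hN : (n + 1 - 1).toNat = n.toNat := by omega
  rw [hN, List.flatMap_def, List.map_map]
  congr 1
  congr 1
  have hcong : ∀ k ∈ List.range n.toNat,
      ((fun i =>
            if i = 1 then [pyCenter ['*'] (2 * n - 1)]
            else
              if i = n then [PySem.Chars.join [' '] (List.map (fun c => [c]) (PySem.List.pyRepeat ['*'] n))]
              else [pyCenter (['*'] ++ PySem.List.pyRepeat [' '] (2 * i - 3) ++ ['*']) (2 * n - 1)]) ∘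
          fun (k : Nat) => 1 + (k:Int)) k = [specRow n.toNat k] := by
    intro k hk
    simp only [List.mem_range] at hk
    simp only [Function.comp_apply]
    by_cases hk0 : k = 0
    · subst hk0
      rw [if_pos (by omega)]
      by_cases hn1 : n = 1
      · subst hn1; exact congrArg (fun l => [l]) rowA_top1
      · exact congrArg (fun l => [l]) (rowA_top n (by omega))
    · rw [if_neg (by omega)]
      by_cases hkn : 1 + (k:Int) = n
      · rw [if_pos hkn]
        have : specRow n.toNat k = specRow n.toNat (n-1).toNat := by congr 1; omega
        rw [this]
        exact congrArg (fun l => [l]) (rowA_bot n (by omega))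
      · rw [if_neg hkn]
        have h1 : (2 * (1+(k:Int)) - 3) = 2*(1+(k:Int))-3 := rfl
        have := rowA_mid n (1+(k:Int)) (by omega) (by omega)
        have hidx : ((1:Int)+(k:Int)-1).toNat = k := by omega
        rw [hidx] at this
        exact congrArg (fun l => [l]) this
  rw [List.map_congr_left hcong]
  exact flatten_singletons _ _

-- the diagonal row, elementwise
theorem diagRow_eq (n : Int) (k : Nat) (hn : 1 ≤ n) (hk : k < n.toNat) :
    ((List.replicate (2*n-1).toNat ' ').set (n - 1 - (k:Int)).toNat '*').set (n - 1 + (k:Int)).toNat '*'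
      = (List.range (2*n.toNat-1)).map
          (fun c => if c = n.toNat - 1 - k ∨ c = n.toNat - 1 + k then '*' else ' ') := by
  apply List.ext_getElem (by simp; omega)
  intro c h1 h2
  simp only [List.getElem_map, List.getElem_range, List.getElem_set, List.getElem_replicate]
  have ha : (n - 1 - (k:Int)).toNat = n.toNat - 1 - k := by omega
  have hb : (n - 1 + (k:Int)).toNat = n.toNat - 1 + k := by omega
  rw [ha, hb]
  split
  · rw [if_pos (by omega)]
  · split
    · rw [if_pos (by omega)]
    · rw [if_neg (by omega)]

-- stamping then erasing the two diagonal cells restores the blank buffer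
theorem reset_blank (w a b : Nat) :
    ((((List.replicate w ' ').set a '*').set b '*').set a ' ').set b ' '
      = List.replicate w ' ' := by
  apply List.ext_getElem (by simp)
  intro c h1 h2
  simp only [List.getElem_set, List.getElem_replicate]
  split_ifs <;> rfl

-- the first loop keeps the buffer blank and appends one diagonal row per iteration
theorem fold_blank (n : Int) (w : Nat) (L : List Int) (out : List (List Char)) :
    L.foldl
      (fun (st : List Char × List (List Char)) r =>
        let buf := (st.1.set (n - 1 - r).toNat '*').set (n - 1 + r).toNat '*'
        let out := st.2 ++ [buf]
        (((buf.set (n - 1 - r).toNat ' ').set (n - 1 + r).toNat ' '), out))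
      (List.replicate w ' ', out)
      = (List.replicate w ' ',
         out ++ L.map (fun r =>
           ((List.replicate w ' ').set (n - 1 - r).toNat '*').set (n - 1 + r).toNat '*')) := by
  induction L generalizing out with
  | nil => simp
  | cons r L ih =>
    simp only [List.foldl_cons, List.map_cons]
    rw [show ((((List.replicate w ' ').set (n - 1 - r).toNat '*').set (n - 1 + r).toNat
          '*').set (n - 1 - r).toNat ' ').set (n - 1 + r).toNat ' ' = List.replicate w ' '
        from reset_blank w _ _]
    rw [ih]
    simp

theorem specRow_diag (n : Int) (k : Nat) (hn : 1 ≤ n) (hk : k < n.toNat) (hne : k ≠ n.toNat - 1) :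
    specRow n.toNat k
      = (List.range (2*n.toNat-1)).map
          (fun c => if c = n.toNat - 1 - k ∨ c = n.toNat - 1 + k then '*' else ' ') := by
  rw [specRow]
  apply List.map_congr_left
  intro c hc
  simp only [List.mem_range] at hc
  unfold starAt
  split
  · rw [if_pos (by omega)]
  · rw [if_neg (by omega)]

theorem specRow_bot (n : Int) (hn : 1 ≤ n) :
    specRow n.toNat (n.toNat - 1)
      = (List.range (2*n.toNat-1)).map (fun c => if c % 2 = 0 then '*' else ' ') := by
  rw [specRow]
  apply List.map_congr_left
  intro c hc
  simp only [List.mem_range] at hc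
  unfold starAt
  split
  · rw [if_pos (by omega)]
  · rw [if_neg (by omega)]

theorem foldl_set_len (L : List Int) (row : List Char) :
    (L.foldl (fun r i => r.set i.toNat '*') row).length = row.length := by
  induction L generalizing row with
  | nil => rfl
  | cons i L ih => simp [List.foldl_cons, ih]

theorem foldl_set_star (L : List Int) (row : List Char) (c : Nat)
    (h : c < (L.foldl (fun r i => r.set i.toNat '*') row).length) (h2 : c < row.length) :
    (L.foldl (fun r i => r.set i.toNat '*') row)[c]
      = if c ∈ L.map Int.toNat then '*' else row[c] := by
  induction L generalizing row with
  | nil => simp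
  | cons i L ih =>
    simp only [List.foldl_cons, List.map_cons, List.mem_cons]
    rw [ih (row.set i.toNat '*') (by simpa using h) (by simpa using h2)]
    by_cases hm : c ∈ L.map Int.toNat
    · simp [hm]
    · by_cases he : i.toNat = c
      · simp [hm, he, List.getElem_set]
      · simp [hm, he, List.getElem_set]
        intro hce; exact absurd hce.symm he

theorem mem_evens (n : Int) (c : Nat) (hn : 1 ≤ n) (hc : c < 2*n.toNat-1) :
    c ∈ (PySem.List.pyRange 0 (2*n-1) 2).map Int.toNat ↔ c % 2 = 0 := by
  rw [PySem.List.pyRange_of_pos _ _ (by omega)]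
  rw [if_pos (by omega)]
  have hM : ((2*n-1-0+2-1)/2).toNat = n.toNat := by omega
  rw [hM]
  simp only [List.map_map, List.mem_map, List.mem_range, Function.comp_apply]
  constructor
  · rintro ⟨k, hk, hek⟩; omega
  · intro he; exact ⟨c/2, by omega, by omega⟩

theorem b_rows (n : Int) (hn : 1 ≤ n) :
    hollow_triangle_alt n =
      String.ofList (PySem.Chars.join ['\n'] ((List.range n.toNat).map (specRow n.toNat))) := by
  rw [hollow_triangle_alt, if_neg (by omega)]
  simp only []
  rw [fold_blank]
  simp only [List.nil_append]
  obtain ⟨m, hm⟩ : ∃ m, n.toNat = m + 1 := ⟨n.toNat - 1, by omega⟩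
  congr 1
  congr 1
  have hdiag : (PySem.List.pyRange 0 (n-1) 1).map
      (fun r => ((List.replicate (2*n-1).toNat ' ').set (n - 1 - r).toNat '*').set (n - 1 + r).toNat '*')
      = (List.range m).map (specRow n.toNat) := by
    rw [PySem.List.pyRange_one]
    have h1 : (n - 1 - 0).toNat = m := by omega
    rw [h1, List.map_map]
    apply List.map_congr_left
    intro k hk
    simp only [List.mem_range] at hk
    simp only [Function.comp_apply]
    have hz : (0 + (k:Int)) = (k:Int) := by omega
    rw [hz, diagRow_eq n k hn (by omega)]
    exact (specRow_diag n k hn (by omega) (by omega)).symm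
  have hbot : (PySem.List.pyRange 0 (2*n-1) 2).foldl (fun b c => b.set c.toNat '*')
        (List.replicate (2*n-1).toNat ' ')
      = specRow n.toNat (n.toNat - 1) := by
    rw [specRow_bot n hn]
    apply List.ext_getElem (by rw [foldl_set_len]; simp; omega)
    intro c hc1 hc2
    have hlen : c < 2*n.toNat-1 := by
      have h := hc1
      rw [foldl_set_len, List.length_replicate] at h
      omega
    rw [foldl_set_star _ _ _ hc1 (by simp; omega)]
    simp only [mem_evens n c hn hlen]
    simp only [List.getElem_map, List.getElem_range, List.getElem_replicate]
  rw [hdiag, hbot, hm]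
  have h2 : m + 1 - 1 = m := rfl
  rw [h2, List.range_succ, List.map_append]
  rfl

-- ===== VERDICT (by name: the statement is the Claim_ definition above) =====
theorem hollow_triangle_spec : Claim_equal_hollow_triangle := by
  intro n _
  unfold Spec_hollow_triangle
  by_cases hn : 1 ≤ n
  · rw [a_rows n hn, b_rows n hn]
  · have h0 : n ≤ 0 := by omega
    show hollow_triangle n = hollow_triangle_alt n
    rw [hollow_triangle, hollow_triangle_alt]
    rw [PySem.List.pyRange_one_eq_nil (by omega)]
    simp [h0]
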